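-- pv_equiv track=rewrite | github.com/Swipesoft/ProCeX | agents/tts_agent.py | _parse_mime_audio_params
-- ===== SOURCE A (Python) =====
-- def _parse_mime_audio_params(mime_type: str) -> dict:
--     """Extract bits_per_sample and rate from audio/L16;rate=24000."""
--     bits_per_sample = 16
--     rate            = 24000
--     for part in mime_type.split(";"):
--         part = part.strip()
--         if part.lower().startswith("rate="):
--             try:
--                 rate = int(part.split("=", 1)[1])
--             except (ValueError, IndexError):
--                 pass
--         elif part.startswith("audio/L"):
--             try:
--                 bits_per_sample = int(part.split("L", 1)[1])
--             except (ValueError, IndexError):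
--                 pass
--     return {"bits_per_sample": bits_per_sample, "rate": rate}
-- ===== SOURCE B (Python) =====
-- def _parse_mime_audio_params(mime_type: str) -> dict:
--     """Extract bits_per_sample and rate from audio/L16;rate=24000.
--
--     Scans the parameters back-to-front, keeping the first valid hit for each
--     key (= the last valid one in the string) and stopping once both are found.
--     """
--     bits_per_sample = None
--     rate = None
--     for part in reversed(mime_type.split(";")):
--         if bits_per_sample is not None and rate is not None:
--             break
--         part = part.strip()
--         if rate is None and part[:5].lower() == "rate=":
--             rate = _int_or_none(part.split("=", 1)[1])
--         elif bits_per_sample is None and part[:7] == "audio/L":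
--             bits_per_sample = _int_or_none(part.split("L", 1)[1])
--     return {"bits_per_sample": 16 if bits_per_sample is None else bits_per_sample,
--             "rate": 24000 if rate is None else rate}
--
--
-- def _int_or_none(s):
--     try:
--         return int(s)
--     except ValueError:
--         return None
-- ===== Notes on version B (the rewrite author's own statement) =====
-- stated objective: alternative
-- what changed: A walks the semicolon-separated parts forward overwriting bits/rate on every valid match; B scans the parts back-to-front with None-initialized state, keeps the first valid hit per key (= A's last valid one), stops early once both keys are found, and falls back to the defaults 16/24000 only at the end.
import Mathlib
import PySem

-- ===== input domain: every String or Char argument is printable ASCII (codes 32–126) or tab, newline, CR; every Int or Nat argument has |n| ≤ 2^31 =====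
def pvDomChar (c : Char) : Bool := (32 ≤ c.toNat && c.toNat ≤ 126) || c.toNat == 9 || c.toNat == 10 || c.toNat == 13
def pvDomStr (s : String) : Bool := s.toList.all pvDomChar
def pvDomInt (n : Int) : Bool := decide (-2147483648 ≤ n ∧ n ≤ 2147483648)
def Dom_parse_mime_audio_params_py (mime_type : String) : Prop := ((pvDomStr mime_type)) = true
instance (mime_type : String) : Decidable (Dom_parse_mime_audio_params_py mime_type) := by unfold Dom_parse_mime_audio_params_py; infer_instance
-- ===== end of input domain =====

-- B replaces A's forward overwrite-on-success loop by a back-to-front scan with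
-- Option state and early exit (first valid hit in reverse = last valid forward);
-- objective: alternative traversal, same exact results.

-- ===== PORT A =====
-- one loop iteration of A: strip, if rate= (case-insensitive) / elif audio/L, int() guarded by try
def pvAStepCore (st : Int × Int) (part : String) : Int × Int :=
  if PySem.Str.startswith (PySem.Str.lower part) "rate=" then
    match PySem.List.pyGet? ((PySem.Str.splitMax? part "=" 1).getD []) 1 with
    | none => st
    | some s =>
      match PySem.Int.ofStr? s with
      | none => st
      | some v => (st.1, v)
  else if PySem.Str.startswith part "audio/L" then
    match PySem.List.pyGet? ((PySem.Str.splitMax? part "L" 1).getD []) 1 with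
    | none => st
    | some s =>
      match PySem.Int.ofStr? s with
      | none => st
      | some v => (v, st.2)
  else st

def pvAStep (st : Int × Int) (part0 : String) : Int × Int :=
  pvAStepCore st (PySem.Str.strip part0)

def parse_mime_audio_params_py (mime_type : String) : List (String × Int) :=
  let st := ((PySem.Str.split? mime_type ";").getD []).foldl pvAStep (16, 24000)
  [("bits_per_sample", st.1), ("rate", st.2)]

-- ===== PORT B =====
def pvIntOrNone (s : String) : Option Int := PySem.Int.ofStr? s

-- B's loop: reversed parts, Option state, break once both found
def pvBLoop : List String → Option Int × Option Int → Option Int × Option Int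
  | [], st => st
  | part0 :: rest, (b?, r?) =>
    if b?.isSome && r?.isSome then (b?, r?)
    else
      let part := PySem.Str.strip part0
      if r?.isNone && (PySem.Str.lower (PySem.Str.slice part none (some 5)) == "rate=") then
        pvBLoop rest (b?, (PySem.List.pyGet? ((PySem.Str.splitMax? part "=" 1).getD []) 1).bind pvIntOrNone)
      else if b?.isNone && (PySem.Str.slice part none (some 7) == "audio/L") then
        pvBLoop rest ((PySem.List.pyGet? ((PySem.Str.splitMax? part "L" 1).getD []) 1).bind pvIntOrNone, r?)
      else pvBLoop rest (b?, r?)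

def parse_mime_audio_params_py_alt (mime_type : String) : List (String × Int) :=
  let st := pvBLoop ((PySem.Str.split? mime_type ";").getD []).reverse (none, none)
  [("bits_per_sample", st.1.getD 16), ("rate", st.2.getD 24000)]

-- ===== PRECONDITION & SPEC =====
def Spec_parse_mime_audio_params_py (mime_type : String) (out : List (String × Int)) : Prop := out = parse_mime_audio_params_py_alt mime_type
instance (mime_type : String) (out : List (String × Int)) : Decidable (Spec_parse_mime_audio_params_py mime_type out) := by unfold Spec_parse_mime_audio_params_py; infer_instance

-- ===== CLAIM (what is proved, stated in full; the proofs are below) =====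
def Claim_equal_parse_mime_audio_params_py : Prop := ∀ (mime_type : String), Dom_parse_mime_audio_params_py mime_type → Spec_parse_mime_audio_params_py mime_type (parse_mime_audio_params_py mime_type)

-- ===== LEMMAS AND PROOFS =====

-- canonical per-part candidates (A's elif baked in)
def pvRCCore (part : String) : Option Int :=
  if PySem.Str.startswith (PySem.Str.lower part) "rate=" then
    (PySem.List.pyGet? ((PySem.Str.splitMax? part "=" 1).getD []) 1).bind PySem.Int.ofStr?
  else none

def pvBCCore (part : String) : Option Int :=
  if PySem.Str.startswith (PySem.Str.lower part) "rate=" then none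
  else if PySem.Str.startswith part "audio/L" then
    (PySem.List.pyGet? ((PySem.Str.splitMax? part "L" 1).getD []) 1).bind PySem.Int.ofStr?
  else none

def pvRC (part0 : String) : Option Int := pvRCCore (PySem.Str.strip part0)
def pvBC (part0 : String) : Option Int := pvBCCore (PySem.Str.strip part0)

theorem pvAStepCore_eq (b r : Int) (p : String) :
    pvAStepCore (b, r) p = ((pvBCCore p).getD b, (pvRCCore p).getD r) := by
  unfold pvAStepCore pvBCCore pvRCCore
  split_ifs with h1 h2 <;>
    rcases hg : PySem.List.pyGet? ((PySem.Str.splitMax? p "=" 1).getD []) 1 with _ | s <;>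
    rcases hg2 : PySem.List.pyGet? ((PySem.Str.splitMax? p "L" 1).getD []) 1 with _ | s2 <;>
    simp_all <;>
    first
    | (rcases PySem.Int.ofStr? s with _ | v <;> simp)
    | (rcases PySem.Int.ofStr? s2 with _ | v2 <;> simp)

theorem pvAStep_eq (b r : Int) (p : String) :
    pvAStep (b, r) p = ((pvBC p).getD b, (pvRC p).getD r) := by
  simp [pvAStep, pvBC, pvRC, pvAStepCore_eq]

theorem pvFoldA (l : List String) (b r : Int) :
    l.foldl pvAStep (b, r) =
      ((l.reverse.findSome? pvBC).getD b, (l.reverse.findSome? pvRC).getD r) := by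
  induction l generalizing b r with
  | nil => simp
  | cons p l ih =>
    simp only [List.foldl_cons, pvAStep_eq, ih, List.reverse_cons, List.findSome?_append]
    rcases l.reverse.findSome? pvBC with _ | x <;>
    rcases l.reverse.findSome? pvRC with _ | y <;>
    simp [List.findSome?] <;>
    (rcases pvBC p with _ | u <;> rcases pvRC p with _ | w <;> simp)

-- guard bridges: B's slice comparison equals A's startswith test
theorem pvGuardR (part : String) :
    (PySem.Str.lower (PySem.Str.slice part none (some 5)) == "rate=") =
      PySem.Str.startswith (PySem.Str.lower part) "rate=" := by
  rw [Bool.eq_iff_iff, beq_iff_eq, String.ext_iff]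
  rw [show PySem.Str.startswith (PySem.Str.lower part) "rate=" =
      PySem.Chars.startswith (PySem.Chars.lower part.toList) "rate=".toList by
    simp [PySem.Str.startswith, PySem.Str.toList_lower]]
  rw [PySem.Chars.startswith_iff, List.prefix_iff_eq_take]
  rw [show (PySem.Str.lower (PySem.Str.slice part none (some 5))).toList =
      PySem.Chars.lower (PySem.List.slice part.toList none (some 5)) by
    simp [PySem.Str.toList_lower, PySem.Str.toList_slice]]
  rw [PySem.List.slice_to part.toList (by norm_num : (0:Int) ≤ 5)]
  simp [PySem.Chars.lower, List.map_take, eq_comm,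
    show "rate=".toList = ['r', 'a', 't', 'e', '='] from rfl]

theorem pvGuardB (part : String) :
    (PySem.Str.slice part none (some 7) == "audio/L") =
      PySem.Str.startswith part "audio/L" := by
  rw [Bool.eq_iff_iff, beq_iff_eq, String.ext_iff]
  rw [show PySem.Str.startswith part "audio/L" =
      PySem.Chars.startswith part.toList "audio/L".toList from rfl]
  rw [PySem.Chars.startswith_iff, List.prefix_iff_eq_take]
  rw [show (PySem.Str.slice part none (some 7)).toList =
      PySem.List.slice part.toList none (some 7) by simp [PySem.Str.toList_slice]]
  rw [PySem.List.slice_to part.toList (by norm_num : (0:Int) ≤ 7)]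
  simp [eq_comm, show "audio/L".toList = ['a', 'u', 'd', 'i', 'o', '/', 'L'] from rfl]

-- mutual exclusivity of the two prefixes
theorem pvExcl (part : String) (h : PySem.Str.startswith part "audio/L" = true) :
    PySem.Str.startswith (PySem.Str.lower part) "rate=" = false := by
  have hp : "audio/L".toList <+: part.toList := by
    rw [show PySem.Str.startswith part "audio/L" =
        PySem.Chars.startswith part.toList "audio/L".toList from rfl,
      PySem.Chars.startswith_iff] at h
    exact h
  obtain ⟨t, ht⟩ := hp
  rw [Bool.eq_false_iff]
  intro hc
  rw [show PySem.Str.startswith (PySem.Str.lower part) "rate=" =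
      PySem.Chars.startswith (PySem.Chars.lower part.toList) "rate=".toList by
    simp [PySem.Str.startswith, PySem.Str.toList_lower], PySem.Chars.startswith_iff] at hc
  rw [← ht] at hc
  simp [PySem.Chars.lower, PySem.Chars.lowerChar, PySem.Chars.isupper,
    List.cons_prefix_cons] at hc

theorem pvFindSome_cons_or (f : String → Option Int) (p : String) (l : List String) :
    (p :: l).findSome? f = (f p).or (l.findSome? f) := by
  rcases h : f p with _ | v <;> simp [h]

theorem pvRC_of_R (p : String)
    (h : PySem.Str.startswith (PySem.Str.lower (PySem.Str.strip p)) "rate=" = true) :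
    pvRC p = (PySem.List.pyGet? ((PySem.Str.splitMax? (PySem.Str.strip p) "=" 1).getD []) 1).bind
      PySem.Int.ofStr? := by
  simp only [pvRC, pvRCCore, h, if_true]

theorem pvRC_of_nR (p : String)
    (h : PySem.Str.startswith (PySem.Str.lower (PySem.Str.strip p)) "rate=" = false) :
    pvRC p = none := by
  simp only [pvRC, pvRCCore, h, Bool.false_eq_true, if_false]

theorem pvBC_of_R (p : String)
    (h : PySem.Str.startswith (PySem.Str.lower (PySem.Str.strip p)) "rate=" = true) :
    pvBC p = none := by
  simp only [pvBC, pvBCCore, h, if_true]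

theorem pvBC_of_B (p : String)
    (hR : PySem.Str.startswith (PySem.Str.lower (PySem.Str.strip p)) "rate=" = false)
    (hB : PySem.Str.startswith (PySem.Str.strip p) "audio/L" = true) :
    pvBC p = (PySem.List.pyGet? ((PySem.Str.splitMax? (PySem.Str.strip p) "L" 1).getD []) 1).bind
      PySem.Int.ofStr? := by
  simp only [pvBC, pvBCCore, hR, hB, Bool.false_eq_true, if_false, if_true]

theorem pvBC_of_none (p : String)
    (hR : PySem.Str.startswith (PySem.Str.lower (PySem.Str.strip p)) "rate=" = false)
    (hB : PySem.Str.startswith (PySem.Str.strip p) "audio/L" = false) :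
    pvBC p = none := by
  simp only [pvBC, pvBCCore, hR, hB, Bool.false_eq_true, if_false]

theorem pvBLoop_eq (l : List String) (b? r? : Option Int) :
    pvBLoop l (b?, r?) = (b?.or (l.findSome? pvBC), r?.or (l.findSome? pvRC)) := by
  induction l generalizing b? r? with
  | nil => rcases b? <;> rcases r? <;> simp [pvBLoop]
  | cons p l ih =>
    rw [pvFindSome_cons_or, pvFindSome_cons_or, ← Option.or_assoc, ← Option.or_assoc]
    cases hR : PySem.Str.startswith (PySem.Str.lower (PySem.Str.strip p)) "rate=" with
    | true =>
      have hB : PySem.Str.startswith (PySem.Str.strip p) "audio/L" = false := by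
        cases hB : PySem.Str.startswith (PySem.Str.strip p) "audio/L" with
        | false => rfl
        | true => rw [pvExcl _ hB] at hR; cases hR
      rw [pvBC_of_R p hR, pvRC_of_R p hR]
      rcases b? with _ | bv <;> rcases r? with _ | rv <;>
        simp only [pvBLoop, pvGuardR, pvGuardB, hR, hB, pvIntOrNone, Option.isSome_none,
          Option.isSome_some, Option.isNone_none, Option.isNone_some,
          Bool.and_false, Bool.and_true, Bool.false_eq_true, if_false, if_true,
          Option.or_none, Option.none_or, Option.some_or, ih]
    | false =>
      rw [pvRC_of_nR p hR]
      cases hB : PySem.Str.startswith (PySem.Str.strip p) "audio/L" with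
      | true =>
        rw [pvBC_of_B p hR hB]
        rcases b? with _ | bv <;> rcases r? with _ | rv <;>
          simp only [pvBLoop, pvGuardR, pvGuardB, hR, hB, pvIntOrNone, Option.isSome_none,
            Option.isSome_some, Option.isNone_none, Option.isNone_some,
            Bool.and_false, Bool.and_true, Bool.false_eq_true, if_false, if_true,
            Option.or_none, Option.none_or, Option.some_or, ih]
      | false =>
        rw [pvBC_of_none p hR hB]
        rcases b? with _ | bv <;> rcases r? with _ | rv <;>
          simp only [pvBLoop, pvGuardR, pvGuardB, hR, hB, pvIntOrNone, Option.isSome_none,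
            Option.isSome_some, Option.isNone_none, Option.isNone_some,
            Bool.and_false, Bool.and_true, Bool.false_eq_true, if_false, if_true,
            Option.or_none, Option.none_or, Option.some_or, ih]

theorem parse_mime_audio_params_py_spec : Claim_equal_parse_mime_audio_params_py := by
  intro mime _
  unfold Spec_parse_mime_audio_params_py parse_mime_audio_params_py parse_mime_audio_params_py_alt
  simp only [pvFoldA, pvBLoop_eq, Option.none_or]
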